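-- pv_equiv track=rewrite | github.com/SarathSrikakula/kite-callback | main1.py | group_coordinates
-- ===== SOURCE A (Python) =====
-- def group_coordinates(coords, threshold=10):
--     if not coords: return []
--     groups, current_group = [], [coords[0]]
--     for i in range(1, len(coords)):
--         if abs(coords[i][1] - coords[i - 1][1]) <= threshold:
--             current_group.append(coords[i])
--         else:
--             groups.append(current_group)
--             current_group = [coords[i]]
--     groups.append(current_group)
--     return groups
-- ===== SOURCE B (Python) =====
-- def group_coordinates(coords, threshold=10):
--     if not coords:
--         return []
--     n = len(coords)
--     breaks = [i for i in range(1, n)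
--               if abs(coords[i][1] - coords[i - 1][1]) > threshold]
--     bounds = [0] + breaks + [n]
--     return [coords[a:b] for a, b in zip(bounds, bounds[1:])]
-- ===== Notes on version B (the rewrite author's own statement) =====
-- stated objective: alternative
-- what changed: Replaces the accumulate-and-flush running group with a compute-break-indices-then-partition-by-slicing decomposition: one scan collects the indices where the y-gap exceeds the threshold, and the groups are formed as slices between consecutive boundaries.
import Mathlib
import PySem

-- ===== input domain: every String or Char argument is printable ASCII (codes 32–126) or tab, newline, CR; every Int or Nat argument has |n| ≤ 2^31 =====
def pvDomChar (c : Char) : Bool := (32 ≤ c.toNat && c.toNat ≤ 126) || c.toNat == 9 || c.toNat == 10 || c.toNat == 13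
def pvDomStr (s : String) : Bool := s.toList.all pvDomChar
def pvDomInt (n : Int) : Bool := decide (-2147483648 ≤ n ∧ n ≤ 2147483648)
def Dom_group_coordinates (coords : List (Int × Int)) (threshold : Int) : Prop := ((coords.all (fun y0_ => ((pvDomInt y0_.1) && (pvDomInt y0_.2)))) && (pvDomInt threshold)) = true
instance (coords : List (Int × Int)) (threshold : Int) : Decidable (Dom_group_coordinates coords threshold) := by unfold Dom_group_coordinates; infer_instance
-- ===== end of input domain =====

-- B replaces A's accumulate-and-flush running group with a compute-break-indices-then-slice
-- partition of the same cost (objective: alternative decomposition; return values proved equal).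


-- ===== PORT A =====
-- loop body of A's for-loop, over the state (groups, current_group)
def gcStep (coords : List (Int × Int)) (threshold : Int)
    (s : List (List (Int × Int)) × List (Int × Int)) (i : Int) :
    List (List (Int × Int)) × List (Int × Int) :=
  if |(PySem.List.pyGetD coords i (0, 0)).2 - (PySem.List.pyGetD coords (i - 1) (0, 0)).2| ≤ threshold
  then (s.1, s.2 ++ [PySem.List.pyGetD coords i (0, 0)])
  else (s.1 ++ [s.2], [PySem.List.pyGetD coords i (0, 0)])

def group_coordinates (coords : List (Int × Int)) (threshold : Int) : List (List (Int × Int)) :=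
  match coords with
  | [] => []
  | c0 :: _ =>
    let st := (PySem.List.pyRange 1 (coords.length : Int)).foldl (gcStep coords threshold) ([], [c0])
    st.1 ++ [st.2]

-- ===== PORT B =====
-- B's break predicate: the y-gap at index i exceeds the threshold
def brk (coords : List (Int × Int)) (threshold : Int) (i : Int) : Bool :=
  decide (threshold < |(PySem.List.pyGetD coords i (0, 0)).2 - (PySem.List.pyGetD coords (i - 1) (0, 0)).2|)

def group_coordinates_alt (coords : List (Int × Int)) (threshold : Int) : List (List (Int × Int)) :=
  if coords.isEmpty then []
  else
    let n : Int := (coords.length : Int)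
    let breaks := (PySem.List.pyRange 1 n).filter (brk coords threshold)
    let bounds : List Int := 0 :: (breaks ++ [n])
    (bounds.zip bounds.tail).map (fun ab => PySem.List.slice coords (some ab.1) (some ab.2))

-- ===== PRECONDITION & SPEC =====
def Spec_group_coordinates (coords : List (Int × Int)) (threshold : Int) (out : List (List (Int × Int))) : Prop := out = group_coordinates_alt coords threshold
instance (coords : List (Int × Int)) (threshold : Int) (out : List (List (Int × Int))) : Decidable (Spec_group_coordinates coords threshold out) := by unfold Spec_group_coordinates; infer_instance

-- ===== CLAIM (what is proved, stated in full; the proofs are below) =====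
def Claim_equal_group_coordinates : Prop := ∀ (coords : List (Int × Int)) (threshold : Int), Dom_group_coordinates coords threshold → Spec_group_coordinates coords threshold (group_coordinates coords threshold)

-- ===== LEMMAS AND PROOFS =====

-- groups formed from consecutive pairs of a bounds list (no final bound appended yet)
def pairsOf (coords : List (Int × Int)) (l : List Int) : List (List (Int × Int)) :=
  (l.zip l.tail).map (fun ab => PySem.List.slice coords (some ab.1) (some ab.2))

-- last element of a bounds tail, default 0 (= (0 :: l).getLast)
def lastB (l : List Int) : Int := l.foldl (fun _ x => x) 0

theorem lastB_concat (l : List Int) (x : Int) : lastB (l ++ [x]) = x := by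
  simp [lastB, List.foldl_append]

theorem lastB_mem (l : List Int) : lastB l = 0 ∨ lastB l ∈ l := by
  induction l using List.reverseRecOn with
  | nil => left; rfl
  | append_singleton l x _ => right; simp [lastB_concat]

theorem zipTail_concat {α : Type} (l : List α) (x : α) (h : l ≠ []) :
    (l ++ [x]).zip (l ++ [x]).tail = l.zip l.tail ++ [(l.getLast h, x)] := by
  induction l with
  | nil => exact absurd rfl h
  | cons a t ih =>
    cases t with
    | nil => simp
    | cons b t' =>
      have := ih (by simp)
      simp only [List.cons_append, List.zip_cons_cons, List.tail_cons] at this ⊢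
      rw [this]
      simp [List.getLast]

theorem pairsOf_concat (coords : List (Int × Int)) (l : List Int) (x : Int) (h : l ≠ []) :
    pairsOf coords (l ++ [x]) =
      pairsOf coords l ++ [PySem.List.slice coords (some (l.getLast h)) (some x)] := by
  simp [pairsOf, zipTail_concat l x h]

theorem getLast_cons_foldl (a : Int) (l : List Int) :
    (a :: l).getLast (by simp) = l.foldl (fun _ x => x) a := by
  induction l generalizing a with
  | nil => rfl
  | cons b t ih => rw [List.getLast_cons (by simp), ih b]; rfl

theorem getLast_zero_cons (l : List Int) : (0 :: l).getLast (by simp) = lastB l :=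
  getLast_cons_foldl 0 l

theorem slice_snoc {α : Type} (xs : List α) (a : Int) (k : Nat)
    (h0 : 0 ≤ a) (hak : a ≤ (k : Int)) (hk : k < xs.length) :
    PySem.List.slice xs (some a) (some ((k : Int) + 1)) =
      PySem.List.slice xs (some a) (some (k : Int)) ++ [xs[k]] := by
  obtain ⟨m, rfl⟩ : ∃ m : Nat, a = (m : Int) := ⟨a.toNat, (Int.toNat_of_nonneg h0).symm⟩
  have hm : m ≤ k := by exact_mod_cast hak
  rw [show ((k : Int) + 1) = ((k + 1 : Nat) : Int) by push_cast; ring]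
  rw [PySem.List.slice_natCast, PySem.List.slice_natCast]
  rw [show k + 1 - m = (k - m) + 1 by omega, List.take_add_one]
  have : (xs.drop m)[k - m]? = some xs[k] := by
    rw [List.getElem?_drop, show m + (k - m) = k by omega, List.getElem?_eq_getElem hk]
  simp [this]

theorem pyGetD_at (coords : List (Int × Int)) (k : Nat) (hk : k < coords.length) :
    PySem.List.pyGetD coords (k : Int) (0, 0) = coords[k] := by
  rw [PySem.List.pyGetD_natCast, List.getD_eq_getElem?_getD, List.getElem?_eq_getElem hk]
  rfl

theorem slice_single (coords : List (Int × Int)) (k : Nat) (hk : k < coords.length) :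
    PySem.List.slice coords (some (k : Int)) (some ((k : Int) + 1)) = [coords[k]] := by
  rw [slice_snoc coords (k : Int) k (Int.natCast_nonneg k) le_rfl hk, PySem.List.slice_natCast]
  simp

-- bounds of the filtered break indices below k
theorem lastB_filt_bounds (coords : List (Int × Int)) (t : Int) (k : Nat) :
    0 ≤ lastB ((PySem.List.pyRange 1 (k : Int)).filter (brk coords t)) ∧
      lastB ((PySem.List.pyRange 1 (k : Int)).filter (brk coords t)) ≤ (k : Int) := by
  rcases lastB_mem ((PySem.List.pyRange 1 (k : Int)).filter (brk coords t)) with h | h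
  · constructor <;> simp [h]
  · have := (List.mem_filter.mp h).1
    rw [PySem.List.mem_pyRange_one] at this
    omega

-- the loop invariant: after processing indices 1..k-1, the flushed groups are the slices
-- between consecutive break indices below k and the current group runs from the last break to k
theorem loop_inv (c0 : Int × Int) (rest : List (Int × Int)) (t : Int) (k : Nat)
    (hk1 : 1 ≤ k) (hk2 : k ≤ (c0 :: rest).length) :
    (PySem.List.pyRange 1 (k : Int)).foldl (gcStep (c0 :: rest) t) ([], [c0]) =
      (pairsOf (c0 :: rest) (0 :: (PySem.List.pyRange 1 (k : Int)).filter (brk (c0 :: rest) t)),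
        PySem.List.slice (c0 :: rest)
          (some (lastB ((PySem.List.pyRange 1 (k : Int)).filter (brk (c0 :: rest) t))))
          (some (k : Int))) := by
  induction k with
  | zero => omega
  | succ k ih =>
    rcases Nat.eq_or_lt_of_le hk1 with h1 | h1
    · -- k + 1 = 1 : the loop has not run
      have hk0 : k = 0 := by omega
      subst hk0
      have hr : PySem.List.pyRange 1 ((0 + 1 : Nat) : Int) = [] := by norm_num [PySem.List.pyRange]
      rw [hr]
      simp only [List.foldl_nil, List.filter_nil, pairsOf, lastB]
      rw [show ((0 + 1 : Nat) : Int) = ((1 : Nat) : Int) by norm_num,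
        show (0 : Int) = ((0 : Nat) : Int) by norm_num, PySem.List.slice_natCast]
      simp
    · -- k ≥ 1 : peel off index k
      have hk : 1 ≤ k := by omega
      have hklen : k < (c0 :: rest).length := by omega
      have hcast : ((k + 1 : Nat) : Int) = (k : Int) + 1 := by push_cast; ring
      rw [hcast, PySem.List.pyRange_one_succ_right (by exact_mod_cast hk),
        List.foldl_append, List.filter_append,
        ih hk (by omega)]
      obtain ⟨hl0, hlk⟩ := lastB_filt_bounds (c0 :: rest) t k
      by_cases hb : brk (c0 :: rest) t (k : Int)
      · -- break at k: flush the current group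
        rw [List.foldl_cons, List.foldl_nil]
        unfold gcStep
        rw [if_neg (by simpa [brk, not_le] using hb)]
        simp only [List.filter_cons_of_pos hb, List.filter_nil]
        rw [show (0 :: ((PySem.List.pyRange 1 (k : Int)).filter (brk (c0 :: rest) t) ++ [(k : Int)]))
              = (0 :: (PySem.List.pyRange 1 (k : Int)).filter (brk (c0 :: rest) t)) ++ [(k : Int)] by simp,
          pairsOf_concat _ _ _ (by simp), getLast_zero_cons, lastB_concat,
          slice_single (c0 :: rest) k hklen, pyGetD_at (c0 :: rest) k hklen]
      · -- no break at k: extend the current group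
        rw [List.foldl_cons, List.foldl_nil]
        unfold gcStep
        rw [if_pos (by simpa [brk, not_lt] using hb)]
        simp only [List.filter_cons_of_neg hb, List.filter_nil, List.append_nil]
        rw [slice_snoc (c0 :: rest) _ k hl0 hlk hklen, pyGetD_at (c0 :: rest) k hklen]

-- ===== VERDICT (by name: the statement is the Claim_ definition above) =====
theorem group_coordinates_spec : Claim_equal_group_coordinates := by
  intro coords threshold _
  unfold Spec_group_coordinates
  match coords with
  | [] => rfl
  | c0 :: rest =>
    unfold group_coordinates group_coordinates_alt
    simp only [List.isEmpty_cons, Bool.false_eq_true, if_false]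
    have hlen : 1 ≤ (c0 :: rest).length := by simp
    rw [loop_inv c0 rest threshold (c0 :: rest).length hlen le_rfl]
    have hp : ∀ l : List Int,
        (l.zip l.tail).map (fun ab => PySem.List.slice (c0 :: rest) (some ab.1) (some ab.2))
          = pairsOf (c0 :: rest) l := fun l => rfl
    rw [hp, show ((0 : Int) :: ((PySem.List.pyRange 1 ((c0 :: rest).length : Int)).filter
            (brk (c0 :: rest) threshold) ++ [((c0 :: rest).length : Int)]))
          = (0 :: (PySem.List.pyRange 1 ((c0 :: rest).length : Int)).filter
            (brk (c0 :: rest) threshold)) ++ [((c0 :: rest).length : Int)] by simp,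
      pairsOf_concat _ _ _ (by simp), getLast_zero_cons]
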